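-- pv_equiv track=rewrite | github.com/iggy14750/algos1510 | assignment3/p6_brute.py | evaluate
-- ===== SOURCE A (Python) =====
-- LINE_LEN = 5
--
-- BIG_NUM = 1000000000000000000000
--
-- def evaluate(case):
--     summed = map(sum, case)
--     error = 0
--     for line in summed:
--         if line > LINE_LEN:
--             return BIG_NUM
--         error += LINE_LEN - line
--     return error
-- ===== SOURCE B (Python) =====
-- LINE_LEN = 5
--
-- BIG_NUM = 1000000000000000000000
--
-- def _scan(lines):
--     # right-fold over the lines: returns (all lines fit, total slack),
--     # computed back-to-front with no early exit and no sentinel values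
--     if not lines:
--         return (True, 0)
--     ok, slack = _scan(lines[1:])
--     s = sum(lines[0])
--     return (ok and s <= LINE_LEN, slack + (LINE_LEN - s))
--
-- def evaluate(case):
--     ok, slack = _scan(list(case))
--     return slack if ok else BIG_NUM
-- ===== Notes on version B (the rewrite author's own statement) =====
-- stated objective: alternative
-- what changed: Replaces A's forward early-exit loop (which returns the sentinel the moment a line overflows) with a back-to-front structural recursion carrying a (fits, slack) pair: the feasibility flag and the full slack total are folded up from the tail with no early exit, and the sentinel is chosen only once at the top level.
import Mathlib
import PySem

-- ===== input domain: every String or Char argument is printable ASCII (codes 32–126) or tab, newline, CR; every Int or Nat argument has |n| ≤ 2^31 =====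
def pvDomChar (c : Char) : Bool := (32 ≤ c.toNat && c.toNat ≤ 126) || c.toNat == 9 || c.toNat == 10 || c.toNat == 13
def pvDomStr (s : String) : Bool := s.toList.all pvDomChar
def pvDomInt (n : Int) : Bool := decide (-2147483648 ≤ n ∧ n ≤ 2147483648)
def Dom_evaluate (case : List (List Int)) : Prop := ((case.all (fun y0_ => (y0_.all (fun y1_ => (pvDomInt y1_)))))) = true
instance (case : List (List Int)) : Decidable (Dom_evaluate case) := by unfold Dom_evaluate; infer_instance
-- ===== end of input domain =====

-- B replaces A's forward early-exit sentinel loop by a back-to-front recursion folding up a (fits, slack) pair (alternative decomposition).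

-- ===== PORT A =====
-- forward loop over map(sum, case): return BIG_NUM at the first overflow, else accumulate slack
def evaluateLoop (summed : List Int) (error : Int) : Int :=
  match summed with
  | [] => error
  | line :: rest =>
    if line > 5 then 1000000000000000000000
    else evaluateLoop rest (error + (5 - line))

def evaluate (case : List (List Int)) : Int :=
  evaluateLoop (case.map (fun line => line.sum)) 0

-- ===== PORT B =====
-- right-fold: (all lines fit, total slack), computed from the tail with no early exit
def scanEval (lines : List (List Int)) : Bool × Int :=
  match lines with
  | [] => (true, 0)
  | l :: rest =>
    let p := scanEval rest
    let s := l.sum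
    (p.1 && decide (s ≤ 5), p.2 + (5 - s))

def evaluate_alt (case : List (List Int)) : Int :=
  let p := scanEval case
  if p.1 then p.2 else 1000000000000000000000

-- ===== PRECONDITION & SPEC =====
def Spec_evaluate (case : List (List Int)) (out : Int) : Prop := out = evaluate_alt case
instance (case : List (List Int)) (out : Int) : Decidable (Spec_evaluate case out) := by unfold Spec_evaluate; infer_instance

-- ===== CLAIM (what is proved, stated in full; the proofs are below) =====
def Claim_equal_evaluate : Prop := ∀ (case : List (List Int)), Dom_evaluate case → Spec_evaluate case (evaluate case)

-- ===== LEMMAS AND PROOFS =====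
theorem scanEval_eq (lines : List (List Int)) :
    scanEval lines =
      (!(lines.map (fun l => l.sum)).any (fun s => s > 5),
       5 * ((lines.length : Int)) - (lines.map (fun l => l.sum)).sum) := by
  induction lines with
  | nil => simp [scanEval]
  | cons l rest ih =>
    simp only [scanEval, ih, List.map_cons, List.any_cons, List.length_cons, List.sum_cons,
      Bool.not_or, Prod.mk.injEq]
    constructor
    · rcases Decidable.em (l.sum > 5) with h | h <;> simp [h] <;> omega
    · push_cast; ring

theorem evaluateLoop_eq (summed : List Int) (error : Int) :
    evaluateLoop summed error =
      if summed.any (fun s => s > 5) then 1000000000000000000000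
      else error + (5 * (summed.length : Int) - summed.sum) := by
  induction summed generalizing error with
  | nil => simp [evaluateLoop]
  | cons x xs ih =>
    by_cases hx : x > 5
    · simp [evaluateLoop, hx]
    · simp only [evaluateLoop, if_neg hx, List.any_cons, List.length_cons, List.sum_cons,
        decide_eq_false hx, Bool.false_or]
      rw [ih]
      split_ifs with h
      · rfl
      · push_cast; ring

-- ===== VERDICT (by name: the statement is the Claim_ definition above) =====
theorem evaluate_spec : Claim_equal_evaluate := by
  intro case _
  unfold Spec_evaluate evaluate evaluate_alt
  rw [evaluateLoop_eq, scanEval_eq]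
  by_cases h : (case.map (fun l => l.sum)).any (fun s => s > 5) = true
  · simp [h]
  · simp [h]
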